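-- pv_equiv track=rewrite | github.com/Sachuhich/Konstantin_Derbenev_20121_Minin | Лабораторная работа №2/Лабораторная работа №2.py | place_figures
-- ===== SOURCE A (Python) =====
-- def safe(board,row,col,N): # Проверяет, находится ли клетка под боем другой фигуры
--     for i in range(-2,3): # Клетки под боем находим в промежутке от -2 до +2, остальную доску брать в расчёт смысла нет
--         for j in range(-2,3):
--             if abs(i)==abs(j) and (i!=0 or j!=0): # Проверяем только диагональные клетки
--                 r,c=row+i,col+j # Координаты клетки под боем
--                 if 0<=r<N and 0<=c<N and board[r][c]==1: return False  # Если клетка под боем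
--     return True # Если клетка безопасна
--
-- def place_figures(board,figures,placed,L,N): # Размещаем фигуры на доске
--     if placed==L: return [figures.copy()] # Если все нужные фигуры размещены, возвращаем копию текущего расположения фигур
--     solutions=[] # Список для хранения возможных решений
--     for i in range(N): # Строки
--         for j in range(N): # Столбцы
--             if board[i][j]==0 and safe(board,i,j,N): # Проверка безопасности клетки
--                 board[i][j]=1 # Устанавливаем фигуру
--                 figures.append((i,j)) # Добавляем координаты в список
--                 solutions.extend(place_figures(board,figures,placed+1,L,N)) # Рекурсивно размещаем следующую фигуру
--                 figures.pop() # Убираем последнюю добавленную фигуру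
--                 board[i][j]=0 # Убираем фигуру с клетки
--     return solutions # Все найденные решения
-- ===== SOURCE B (Python) =====
-- # Iterative DFS with an explicit stack of partial states instead of recursive
-- # backtracking with in-place mutation; per-state board/figure copies.
-- def place_figures(board, figures, placed, L, N):
--     attacks = [(-2, -2), (-2, 2), (-1, -1), (-1, 1), (1, -1), (1, 1), (2, -2), (2, 2)]
--     def threatened(bd, row, col):
--         return any(0 <= row + dr < N and 0 <= col + dc < N and bd[row + dr][col + dc] == 1
--                    for dr, dc in attacks)
--     results = []
--     stack = [(list(figures), [row[:] for row in board], placed)]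
--     while stack:
--         figs, bd, p = stack.pop()
--         if p == L:
--             results.append(figs)
--             continue
--         children = []
--         for i in range(N):
--             for j in range(N):
--                 if bd[i][j] == 0 and not threatened(bd, i, j):
--                     nb = [row[:] for row in bd]
--                     nb[i][j] = 1
--                     children.append((figs + [(i, j)], nb, p + 1))
--         stack.extend(reversed(children))
--     return results
-- ===== Notes on version B (the rewrite author's own statement) =====
-- stated objective: alternative
-- what changed: Replaced the recursive backtracking that mutates board/figures in place and undoes each placement with an iterative depth-first search over an explicit stack of immutable partial states (figures-so-far, board copy, count), popping a state, emitting it when complete, and pushing its children in reverse row-major order; the safety test becomes an any() over the explicit list of the 8 diagonal attack offsets.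
import Mathlib
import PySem

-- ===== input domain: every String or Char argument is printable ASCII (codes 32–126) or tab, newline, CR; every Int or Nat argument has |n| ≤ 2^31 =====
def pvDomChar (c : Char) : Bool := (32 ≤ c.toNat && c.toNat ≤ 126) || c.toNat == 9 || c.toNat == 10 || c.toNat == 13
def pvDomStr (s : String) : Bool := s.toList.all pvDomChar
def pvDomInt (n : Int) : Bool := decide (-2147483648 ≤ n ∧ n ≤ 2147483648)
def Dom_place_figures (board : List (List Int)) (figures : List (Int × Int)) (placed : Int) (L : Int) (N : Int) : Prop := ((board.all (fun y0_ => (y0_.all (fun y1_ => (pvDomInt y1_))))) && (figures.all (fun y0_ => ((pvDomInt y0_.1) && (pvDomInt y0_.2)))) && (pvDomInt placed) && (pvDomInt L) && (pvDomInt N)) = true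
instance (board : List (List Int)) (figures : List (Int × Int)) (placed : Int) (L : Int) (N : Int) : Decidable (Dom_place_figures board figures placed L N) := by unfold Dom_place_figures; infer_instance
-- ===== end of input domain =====

-- B replaces A's recursive backtracking (in-place mutation, restore on the way out) by an
-- iterative DFS over an explicit stack of immutable partial states (objective: alternative).
-- A mutates board/figures but restores them before returning, so there is no net mutation to mirror.

-- ===== PORT A =====
-- board[i][j] (both indices are produced by range(N), hence 0 ≤ index < N; exact under Pre_)
def pvAt (bd : List (List Int)) (i j : Int) : Int :=
  PySem.List.pyGetD (PySem.List.pyGetD bd i []) j 0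

-- board[i][j] = v (same index provenance; exact under Pre_)
def pvSet (bd : List (List Int)) (i j v : Int) : List (List Int) :=
  PySem.List.pySetD bd i (PySem.List.pySetD (PySem.List.pyGetD bd i []) j v)

-- safe(board,row,col,N): the nested for over i,j in range(-2,3) with early 'return False'
def safeA (board : List (List Int)) (row col N : Int) : Bool :=
  (PySem.List.pyRange (-2) 3 1).all (fun i =>
    (PySem.List.pyRange (-2) 3 1).all (fun j =>
      !(i.natAbs == j.natAbs && (i != 0 || j != 0) &&
        (decide (0 ≤ row + i) && decide (row + i < N) && decide (0 ≤ col + j) &&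
         decide (col + j < N) && (pvAt board (row + i) (col + j) == 1)))))

-- number of 0-cells of the whole board: each recursive call of A turns one 0-cell into a 1,
-- so 'pvZeros board + 1' fuel is never exhausted under Pre_ (fuel only guards termination)
def pvZeros (bd : List (List Int)) : Nat :=
  (bd.map (fun r => r.countP (fun x => x == 0))).sum

-- place_figures, the recursion made structural on fuel; 'board[i][j]=1 … board[i][j]=0'
-- restores the board, so each loop iteration sees the incoming 'board' again (exact here
-- because the port's board is immutable).
def placeA (fuel : Nat) (board : List (List Int)) (figures : List (Int × Int)) (placed L N : Int) : List (List (Int × Int)) :=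
  if placed == L then [figures]
  else
    match fuel with
    | 0 => []
    | f + 1 =>
      (PySem.List.pyRange 0 N 1).foldl (fun sols i =>
        (PySem.List.pyRange 0 N 1).foldl (fun sols j =>
          if pvAt board i j == 0 && safeA board i j N then
            sols ++ placeA f (pvSet board i j 1) (figures ++ [(i, j)]) (placed + 1) L N
          else sols) sols) []

def place_figures (board : List (List Int)) (figures : List (Int × Int)) (placed : Int) (L : Int) (N : Int) : List (List (Int × Int)) :=
  placeA (pvZeros board + 1) board figures placed L N

-- ===== PORT B =====
-- threatened(bd,row,col): any() over the explicit list of the 8 diagonal attack offsets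
def threatenedB (bd : List (List Int)) (row col N : Int) : Bool :=
  ([((-2 : Int), (-2 : Int)), (-2, 2), (-1, -1), (-1, 1), (1, -1), (1, 1), (2, -2), (2, 2)]).any
    (fun d =>
      decide (0 ≤ row + d.1) && decide (row + d.1 < N) && decide (0 ≤ col + d.2) &&
      decide (col + d.2 < N) && (pvAt bd (row + d.1) (col + d.2) == 1))

-- the children.append(...) double loop of one expansion step
def childrenB (bd : List (List Int)) (figs : List (Int × Int)) (p N : Int) :
    List (List (Int × Int) × List (List Int) × Int) :=
  (PySem.List.pyRange 0 N 1).foldl (fun ch i =>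
    (PySem.List.pyRange 0 N 1).foldl (fun ch j =>
      if pvAt bd i j == 0 && !threatenedB bd i j N then
        ch ++ [(figs ++ [(i, j)], pvSet bd i j 1, p + 1)]
      else ch) ch) []

-- fuel bound for the while loop: the number of its iterations started from one state
def costB (fuel : Nat) (bd : List (List Int)) (p L N : Int) : Nat :=
  if p == L then 1
  else
    match fuel with
    | 0 => 1
    | f + 1 => 1 + ((childrenB bd [] p N).map (fun s => costB f s.2.1 s.2.2 L N)).sum

-- the while loop; the Lean list's HEAD is the TOP of the Python stack (its last element),
-- so pop() takes the head and extend(reversed(children)) is 'childrenB … ++ rest'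
def loopB (fuel : Nat) (stack : List (List (Int × Int) × List (List Int) × Int))
    (res : List (List (Int × Int))) (L N : Int) : List (List (Int × Int)) :=
  match fuel with
  | 0 => res
  | f + 1 =>
    match stack with
    | [] => res
    | (figs, bd, p) :: rest =>
      if p == L then loopB f rest (res ++ [figs]) L N
      else loopB f (childrenB bd figs p N ++ rest) res L N

def place_figures_alt (board : List (List Int)) (figures : List (Int × Int)) (placed : Int) (L : Int) (N : Int) : List (List (Int × Int)) :=
  loopB (costB (pvZeros board + 1) board placed L N) [(figures, board, placed)] [] L N

-- ===== PRECONDITION & SPEC =====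
-- the board shape the double loops index unconditionally: first N rows, each of length ≥ N
def pvWF (bd : List (List Int)) (N : Int) : Prop :=
  N.toNat ≤ bd.length ∧ ∀ k < N.toNat, N.toNat ≤ (bd.getD k []).length

-- Pre_ excludes exactly the inputs where Python A raises IndexError: placed ≠ L with N > 0 and
-- a board lacking the first N rows of length ≥ N that the double loop indexes unconditionally
-- (when placed == L the board is never touched, so any board is admitted there).
def Pre_place_figures (board : List (List Int)) (figures : List (Int × Int)) (placed : Int) (L : Int) (N : Int) : Prop :=
  placed = L ∨ pvWF board N
instance (board : List (List Int)) (figures : List (Int × Int)) (placed : Int) (L : Int) (N : Int) : Decidable (Pre_place_figures board figures placed L N) := by unfold Pre_place_figures pvWF; infer_instance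

def pvWitness_place_figures : List (List Int) × (List (Int × Int)) × Int × Int × Int :=
  ([[0, 0], [0, 0]], [], 0, 1, 2)

def Spec_place_figures (board : List (List Int)) (figures : List (Int × Int)) (placed : Int) (L : Int) (N : Int) (out : List (List (Int × Int))) : Prop := out = place_figures_alt board figures placed L N
instance (board : List (List Int)) (figures : List (Int × Int)) (placed : Int) (L : Int) (N : Int) (out : List (List (Int × Int))) : Decidable (Spec_place_figures board figures placed L N out) := by unfold Spec_place_figures; infer_instance

-- ===== CLAIM (what is proved, stated in full; the proofs are below) =====
def Claim_equal_place_figures : Prop := ∀ (board : List (List Int)) (figures : List (Int × Int)) (placed : Int) (L : Int) (N : Int), Dom_place_figures board figures placed L N → Pre_place_figures board figures placed L N → Spec_place_figures board figures placed L N (place_figures board figures placed L N)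

-- ===== LEMMAS AND PROOFS =====

-- the candidate cells of one expansion level, row-major (both ports scan exactly these)
def pvCands (bd : List (List Int)) (N : Int) : List (Int × Int) :=
  (PySem.List.pyRange 0 N 1).flatMap (fun i =>
    ((PySem.List.pyRange 0 N 1).filter (fun j => pvAt bd i j == 0 && safeA bd i j N)).map
      (fun j => (i, j)))

-- 'out.extend(g(x)) if p(x)' loop shape (the conditional variant of foldl_append_eq_flatMap)
theorem pv_foldl_if {α β : Type} (p : α → Bool) (g : α → List β) :
    ∀ (l : List α) (a0 : List β),
      l.foldl (fun a x => if p x then a ++ g x else a) a0 = a0 ++ (l.filter p).flatMap g := by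
  intro l
  induction l with
  | nil => intro a0; simp
  | cons x t ih => intro a0; cases h : p x <;> simp [List.foldl_cons, h, ih]

-- A's safety test and B's threat test agree (same 8 diagonal offsets, same atoms)
theorem pv_safe_eq (bd : List (List Int)) (r c N : Int) :
    safeA bd r c N = !threatenedB bd r c N := by
  simp [safeA, threatenedB, show PySem.List.pyRange (-2) 3 1 = [-2, -1, 0, 1, 2] from rfl]
  simp [Bool.and_assoc]

-- one unfolding of A's recursion at a non-leaf
theorem pv_placeA_succ (f : Nat) (bd : List (List Int)) (figs : List (Int × Int))
    (p L N : Int) (hp : (p == L) = false) :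
    placeA (f + 1) bd figs p L N =
      (pvCands bd N).flatMap
        (fun c => placeA f (pvSet bd c.1 c.2 1) (figs ++ [c]) (p + 1) L N) := by
  rw [placeA]
  simp only [hp, Bool.false_eq_true, if_false]
  simp only [pv_foldl_if]
  rw [PySem.List.foldl_append_eq_flatMap]
  simp [pvCands, List.flatMap_assoc, List.flatMap_map]

-- B's expansion step produces exactly the candidate children, in the same order
theorem pv_childrenB_eq (bd : List (List Int)) (figs : List (Int × Int)) (p N : Int) :
    childrenB bd figs p N =
      (pvCands bd N).map (fun c => (figs ++ [c], pvSet bd c.1 c.2 1, p + 1)) := by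
  unfold childrenB
  simp only [← pv_safe_eq]
  simp only [PySem.List.foldl_append_if]
  rw [PySem.List.foldl_append_eq_flatMap]
  simp [pvCands, List.map_flatMap, List.map_map, Function.comp_def]

theorem pv_mem_cands {bd : List (List Int)} {N : Int} {c : Int × Int}
    (h : c ∈ pvCands bd N) :
    0 ≤ c.1 ∧ c.1 < N ∧ 0 ≤ c.2 ∧ c.2 < N ∧ pvAt bd c.1 c.2 = 0 := by
  simp only [pvCands, List.mem_flatMap, List.mem_map, List.mem_filter,
    PySem.List.mem_pyRange_one] at h
  obtain ⟨i, ⟨hi0, hiN⟩, j, ⟨⟨hj0, hjN⟩, hcond⟩, rfl⟩ := h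
  simp only [Bool.and_eq_true, beq_iff_eq] at hcond
  exact ⟨hi0, hiN, hj0, hjN, hcond.1⟩

-- a candidate placement keeps the board well-formed and removes exactly one 0-cell
theorem pv_step {bd : List (List Int)} {N : Int} {c : Int × Int}
    (hWF : pvWF bd N) (hc : c ∈ pvCands bd N) :
    pvWF (pvSet bd c.1 c.2 1) N ∧ pvZeros (pvSet bd c.1 c.2 1) + 1 = pvZeros bd := by
  obtain ⟨hi0, hiN, hj0, hjN, h0⟩ := pv_mem_cands hc
  obtain ⟨hlen, hrows⟩ := hWF
  have hm : c.1.toNat < bd.length := by omega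
  have hmN : c.1.toNat < N.toNat := by omega
  have hgetD : bd.getD c.1.toNat [] = bd[c.1.toNat] := List.getD_eq_getElem bd [] hm
  have hrowlen : N.toNat ≤ bd[c.1.toNat].length := by
    have := hrows _ hmN; rwa [hgetD] at this
  have hn : c.2.toNat < bd[c.1.toNat].length := by omega
  have hrow : PySem.List.pyGetD bd c.1 [] = bd[c.1.toNat] := by
    rw [PySem.List.pyGetD_eq_getElem _ _ hi0 (by omega)]
  have hcell : bd[c.1.toNat][c.2.toNat] = 0 := by
    have := h0
    rw [pvAt, hrow, PySem.List.pyGetD_eq_getElem _ _ hj0 (by omega)] at this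
    exact this
  have hset : pvSet bd c.1 c.2 1 = bd.set c.1.toNat (bd[c.1.toNat].set c.2.toNat 1) := by
    rw [pvSet, hrow, PySem.List.pySetD_of_nonneg _ _ hj0, PySem.List.pySetD_of_nonneg _ _ hi0]
  constructor
  · rw [hset]
    refine ⟨by simpa using hlen, fun k hk => ?_⟩
    have hgd : (bd.set c.1.toNat (bd[c.1.toNat].set c.2.toNat 1)).getD k [] =
        if c.1.toNat = k then bd[c.1.toNat].set c.2.toNat 1 else bd.getD k [] := by
      rw [List.getD_eq_getElem?_getD, List.getD_eq_getElem?_getD, List.getElem?_set]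
      by_cases h1 : c.1.toNat = k
      · subst h1; simp [hm]
      · simp [h1]
    rw [hgd]
    by_cases h1 : c.1.toNat = k
    · rw [if_pos h1, List.length_set, ← hgetD]
      exact hrows _ hmN
    · rw [if_neg h1]
      exact hrows _ hk
  · rw [hset]
    unfold pvZeros
    have hmlen : c.1.toNat < (bd.map (fun r => r.countP (fun x => x == 0))).length := by
      simpa using hm
    rw [List.map_set, List.set_eq_take_append_cons_drop, if_pos hmlen]
    conv_rhs => rw [← List.take_append_drop c.1.toNat
        (List.map (fun r => List.countP (fun x => x == 0) r) bd),
      ← List.getElem_cons_drop hmlen]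
    simp only [List.sum_append, List.sum_cons, List.getElem_map]
    have hcount : (bd[c.1.toNat].set c.2.toNat 1).countP (fun x => x == 0) + 1 =
        bd[c.1.toNat].countP (fun x => x == 0) := by
      rw [List.set_eq_take_append_cons_drop, if_pos hn]
      conv_rhs => rw [← List.take_append_drop c.2.toNat bd[c.1.toNat],
        ← List.getElem_cons_drop hn]
      simp [List.countP_append, hcell]
      omega
    omega

-- every state costs at least one loop iteration
theorem pv_one_le_costB (f : Nat) (bd : List (List Int)) (p L N : Int) :
    1 ≤ costB f bd p L N := by
  cases f <;> · rw [costB]; split <;> simp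

-- cost of a non-leaf state, phrased over the candidates
theorem pv_costB_succ (f : Nat) (bd : List (List Int)) (p L N : Int)
    (hp : (p == L) = false) :
    costB (f + 1) bd p L N =
      1 + ((pvCands bd N).map (fun c => costB f (pvSet bd c.1 c.2 1) (p + 1) L N)).sum := by
  rw [costB]
  simp [hp, pv_childrenB_eq, List.map_map, Function.comp_def]

-- THE DFS LEMMA: with enough fuel, the stack loop returns the accumulated results followed
-- by the recursive solutions of the stacked states, in order
theorem pv_loopB_eq (L N : Int) :
    ∀ (fB : Nat) (stack : List (List (Int × Int) × List (List Int) × Int))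
      (res : List (List (Int × Int))),
      (∀ s ∈ stack, pvWF s.2.1 N) →
      (stack.map (fun s => costB (pvZeros s.2.1 + 1) s.2.1 s.2.2 L N)).sum ≤ fB →
      loopB fB stack res L N =
        res ++ stack.flatMap (fun s => placeA (pvZeros s.2.1 + 1) s.2.1 s.1 s.2.2 L N) := by
  intro fB
  induction fB with
  | zero =>
    intro stack res hWF hsum
    match stack with
    | [] => simp [loopB]
    | s :: rest =>
      exfalso
      have h1 := pv_one_le_costB (pvZeros s.2.1 + 1) s.2.1 s.2.2 L N
      simp only [List.map_cons, List.sum_cons, Nat.le_zero] at hsum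
      omega
  | succ f ih =>
    intro stack res hWF hsum
    match stack with
    | [] => simp [loopB]
    | (figs, bd, p) :: rest =>
      rw [loopB]
      by_cases hp : (p == L) = true
      · rw [if_pos hp]
        have hpL : p = L := by simpa using hp
        have hcost : costB (pvZeros bd + 1) bd p L N = 1 := by rw [costB]; simp [hp]
        rw [ih rest (res ++ [figs]) (fun s hs => hWF s (List.mem_cons_of_mem _ hs))
          (by simp only [List.map_cons, List.sum_cons, hcost] at hsum ⊢; omega)]
        have hleaf : placeA (pvZeros bd + 1) bd figs p L N = [figs] := by
          rw [placeA]; simp [hp]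
        simp [hleaf]
      · rw [if_neg hp]
        have hp' : (p == L) = false := by simpa using hp
        have hWFbd : pvWF bd N := hWF _ List.mem_cons_self
        -- cost bookkeeping
        have hchild : childrenB bd figs p N =
            (pvCands bd N).map (fun c => (figs ++ [c], pvSet bd c.1 c.2 1, p + 1)) :=
          pv_childrenB_eq bd figs p N
        have hcmap : (childrenB bd figs p N).map
              (fun s => costB (pvZeros s.2.1 + 1) s.2.1 s.2.2 L N) =
            (pvCands bd N).map (fun c => costB (pvZeros bd) (pvSet bd c.1 c.2 1) (p + 1) L N) := by
          rw [hchild, List.map_map]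
          refine List.map_congr_left (fun c hc => ?_)
          have := (pv_step hWFbd hc).2
          simp only [Function.comp_def]
          rw [show pvZeros (pvSet bd c.1 c.2 1) + 1 = pvZeros bd from this]
        have hcost : costB (pvZeros bd + 1) bd p L N =
            1 + ((pvCands bd N).map
              (fun c => costB (pvZeros bd) (pvSet bd c.1 c.2 1) (p + 1) L N)).sum :=
          pv_costB_succ (pvZeros bd) bd p L N hp'
        have hWF' : ∀ s ∈ childrenB bd figs p N ++ rest, pvWF s.2.1 N := by
          intro s hs
          rcases List.mem_append.mp hs with hs | hs
          · rw [hchild] at hs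
            obtain ⟨c, hc, rfl⟩ := List.mem_map.mp hs
            exact (pv_step hWFbd hc).1
          · exact hWF s (List.mem_cons_of_mem _ hs)
        have hsum' : ((childrenB bd figs p N ++ rest).map
            (fun s => costB (pvZeros s.2.1 + 1) s.2.1 s.2.2 L N)).sum ≤ f := by
          rw [List.map_append, List.sum_append, hcmap]
          simp only [List.map_cons, List.sum_cons, hcost] at hsum
          omega
        rw [ih _ res hWF' hsum']
        congr 1
        rw [List.flatMap_append, List.flatMap_cons]
        congr 1
        rw [hchild, List.flatMap_map,
          pv_placeA_succ (pvZeros bd) bd figs p L N hp']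
        refine List.flatMap_congr (fun c hc => ?_)
        show placeA (pvZeros (pvSet bd c.1 c.2 1) + 1) (pvSet bd c.1 c.2 1)
            (figs ++ [c]) (p + 1) L N = _
        rw [(pv_step hWFbd hc).2]

-- ===== VERDICT (by name: the statement is the Claim_ definition above) =====
theorem place_figures_spec : Claim_equal_place_figures := by
  intro board figures placed L N _ hpre
  unfold Spec_place_figures place_figures place_figures_alt
  rcases hpre with hpl | hWF
  · subst hpl
    have hcost : costB (pvZeros board + 1) board placed placed N = 1 := by
      rw [costB]; simp
    rw [hcost, placeA]
    simp [loopB]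
  · rw [pv_loopB_eq L N _ _ _ (by simpa using hWF) (by simp)]
    simp
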